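-- pv_equiv track=rewrite | github.com/codesammy/advent-of-code | aoc2019/day04_secure_container.py | same_groups
-- ===== SOURCE A (Python) =====
-- def same_groups(n):
--     it = iter(str(n))
--     group = [next(it)]
--     for digit in it:
--         last = group[-1]
--         if digit == last:
--             group.append(digit)
--         else:
--             if len(group) > 1:
--                 yield group
--             group = [digit]
--     if len(group) > 1:
--         yield group
-- ===== SOURCE B (Python) =====
-- def same_groups(n):
--     s = str(n)
--     i = 0
--     while i < len(s):
--         j = i + 1
--         while j < len(s) and s[j] == s[i]:
--             j += 1
--         if j - i > 1:
--             yield [s[i]] * (j - i)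
--         i = j
-- ===== Notes on version B (the rewrite author's own statement) =====
-- stated objective: alternative
-- what changed: B replaces A's running-group state machine (carrying the current group list and comparing each digit to its last element) by an index-based two-pointer scan that locates each maximal run directly and emits it as a replicated list.
import Mathlib
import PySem

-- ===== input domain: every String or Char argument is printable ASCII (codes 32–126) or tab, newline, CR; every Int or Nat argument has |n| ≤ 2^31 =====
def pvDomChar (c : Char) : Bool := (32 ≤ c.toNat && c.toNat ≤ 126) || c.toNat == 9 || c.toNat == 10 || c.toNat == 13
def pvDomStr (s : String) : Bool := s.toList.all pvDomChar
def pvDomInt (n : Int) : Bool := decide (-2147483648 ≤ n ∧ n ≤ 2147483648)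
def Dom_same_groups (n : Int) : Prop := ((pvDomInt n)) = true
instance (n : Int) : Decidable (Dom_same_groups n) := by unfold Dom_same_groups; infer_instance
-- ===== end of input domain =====

-- B replaces A's running-group state machine by an index-based two-pointer scan locating each
-- maximal run directly (objective: alternative; same linear cost). Equivalence of RETURN values
-- (the yielded lists, collected in order).

-- ===== PORT A =====
-- A's loop body: compare digit to group[-1]; append, or flush the group if longer than 1.
def same_groups_step (st : List String × List (List String)) (digit : String) :
    List String × List (List String) :=
  let group := st.1
  let out := st.2
  let last := group.getLastD ""      -- group[-1]; group is never empty in A's loop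
  if digit = last then (group ++ [digit], out)
  else ([digit], if group.length > 1 then out ++ [group] else out)

def same_groups_body : List String → List (List String)
  | [] => []        -- unreachable: str(n) of an int is never empty
  | first :: rest =>
    if (rest.foldl same_groups_step ([first], [])).1.length > 1 then
      (rest.foldl same_groups_step ([first], [])).2 ++
        [(rest.foldl same_groups_step ([first], [])).1]
    else (rest.foldl same_groups_step ([first], [])).2

def same_groups (n : Int) : List (List String) :=
  same_groups_body ((PySem.Int.toStr n).toList.map (fun c => String.singleton c))

-- ===== PORT B =====
-- B: at position i, scan forward while equal (the inner while loop = takeWhile/dropWhile),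
-- emit [s[i]] * (j - i) if the run is longer than 1, continue at j.
def same_groups_runs : List String → List (List String)
  | [] => []
  | c :: rest =>
    if (rest.takeWhile (fun d => d = c)).length + 1 > 1 then
      List.replicate ((rest.takeWhile (fun d => d = c)).length + 1) c ::
        same_groups_runs (rest.dropWhile (fun d => d = c))
    else same_groups_runs (rest.dropWhile (fun d => d = c))
termination_by l => l.length
decreasing_by
  all_goals
    exact Nat.lt_succ_of_le (List.length_dropWhile_le _ _)

def same_groups_alt (n : Int) : List (List String) :=
  same_groups_runs ((PySem.Int.toStr n).toList.map (fun c => String.singleton c))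

-- ===== PRECONDITION & SPEC =====
def Spec_same_groups (n : Int) (out : List (List String)) : Prop := out = same_groups_alt n
instance (n : Int) (out : List (List String)) : Decidable (Spec_same_groups n out) := by unfold Spec_same_groups; infer_instance

-- ===== CLAIM (what is proved, stated in full; the proofs are below) =====
def Claim_equal_same_groups : Prop := ∀ (n : Int), Dom_same_groups n → Spec_same_groups n (same_groups n)

-- ===== LEMMAS AND PROOFS =====

-- the "final flush" at the end of A
def finishA (st : List String × List (List String)) : List (List String) :=
  if st.1.length > 1 then st.2 ++ [st.1] else st.2

theorem runs_nil : same_groups_runs [] = [] := by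
  rw [same_groups_runs]

theorem runs_cons (c : String) (rest : List String) :
    same_groups_runs (c :: rest) =
      (if 1 + (rest.takeWhile (fun d => d = c)).length > 1 then
          [List.replicate (1 + (rest.takeWhile (fun d => d = c)).length) c] else [])
        ++ same_groups_runs (rest.dropWhile (fun d => d = c)) := by
  rw [same_groups_runs]
  have h : (rest.takeWhile (fun d => d = c)).length + 1 =
      1 + (rest.takeWhile (fun d => d = c)).length := by omega
  rw [h]
  split_ifs <;> simp

theorem finishA_out (x : List String) (E y : List (List String)) :
    finishA (x, E ++ y) = E ++ finishA (x, y) := by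
  unfold finishA
  split_ifs <;> simp

-- the output accumulator of A's step is only appended to
theorem step_out (g : List String) (o : List (List String)) (d : String) :
    same_groups_step (g, o) d =
      ((same_groups_step (g, []) d).1, o ++ (same_groups_step (g, []) d).2) := by
  unfold same_groups_step
  dsimp only
  split_ifs <;> simp

-- ... hence it factors out of the whole fold
theorem same_groups_foldl_out (l : List String) (g : List String) (o : List (List String)) :
    l.foldl same_groups_step (g, o) =
      ((l.foldl same_groups_step (g, [])).1, o ++ (l.foldl same_groups_step (g, [])).2) := by
  induction l generalizing g o with
  | nil => simp
  | cons d rest ih =>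
    simp only [List.foldl_cons]
    rw [step_out g o d,
        ih (same_groups_step (g, []) d).1 (o ++ (same_groups_step (g, []) d).2),
        ih (same_groups_step (g, []) d).1 ((same_groups_step (g, []) d).2)]
    simp

theorem replicate_getLast (k : Nat) (hk : 1 ≤ k) (c : String) :
    (List.replicate k c).getLast?.getD "" = c := by
  cases k with
  | zero => omega
  | succ m => simp [List.getLast?_replicate]

-- finishing A's fold from an all-equal group of size k ≥ 1 gives the run containing it,
-- then B's runs of the remainder
theorem same_groups_main (l : List String) (c : String) (k : Nat) (hk : 1 ≤ k) :
    finishA (l.foldl same_groups_step (List.replicate k c, [])) =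
    (if k + (l.takeWhile (fun d => d = c)).length > 1 then
        [List.replicate (k + (l.takeWhile (fun d => d = c)).length) c] else [])
      ++ same_groups_runs (l.dropWhile (fun d => d = c)) := by
  induction l generalizing c k with
  | nil =>
    simp [finishA, runs_nil]
  | cons d rest ih =>
    simp only [List.foldl_cons]
    have hlast : (List.replicate k c).getLast?.getD "" = c := replicate_getLast k hk c
    by_cases h : d = c
    · subst h
      have hstep : same_groups_step (List.replicate k d, []) d =
          (List.replicate (k + 1) d, []) := by
        simp [same_groups_step, hlast, List.replicate_succ' (n := k)]
      rw [hstep, ih d (k + 1) (by omega)]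
      simp only [List.takeWhile_cons, List.dropWhile_cons]
      have : k + 1 + (rest.takeWhile (fun x => x = d)).length =
          k + ((rest.takeWhile (fun x => x = d)).length + 1) := by omega
      simp [this]
    · have hstep : same_groups_step (List.replicate k c, []) d =
          ([d], if k > 1 then [List.replicate k c] else []) := by
        simp [same_groups_step, hlast, h]
      rw [hstep]
      rw [same_groups_foldl_out rest [d]]
      rw [show ((rest.foldl same_groups_step ([d], [])).1,
            (if k > 1 then [List.replicate k c] else []) ++
              (rest.foldl same_groups_step ([d], [])).2) =
          ((rest.foldl same_groups_step ([d], [])).1,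
            (if k > 1 then [List.replicate k c] else []) ++
              (rest.foldl same_groups_step ([d], [])).2) from rfl]
      rw [finishA_out]
      have hone : ([d] : List String) = List.replicate 1 d := by simp
      rw [hone, ih d 1 (le_refl 1)]
      have htw : ((d :: rest).takeWhile (fun x => x = c)) = [] := by
        simp [h]
      have hdw : ((d :: rest).dropWhile (fun x => x = c)) = d :: rest := by
        simp [h]
      rw [htw, hdw, runs_cons]
      simp

-- ===== VERDICT (by name: the statement is the Claim_ definition above) =====
theorem same_groups_spec : Claim_equal_same_groups := by
  intro n _
  unfold Spec_same_groups same_groups same_groups_alt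
  cases hs : (PySem.Int.toStr n).toList.map (fun c => String.singleton c) with
  | nil => rw [same_groups_body, runs_nil]
  | cons first rest =>
    rw [same_groups_body]
    have hone : ([first] : List String) = List.replicate 1 first := by simp
    have hmain := same_groups_main rest first 1 (le_refl 1)
    rw [hone]
    show finishA (rest.foldl same_groups_step (List.replicate 1 first, [])) =
      same_groups_runs (first :: rest)
    rw [hmain, runs_cons]
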